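-- pv_equiv track=rewrite | github.com/shanjiaming/lean-pl-fix | mathlib_analyzer.py | is_mathlib_reference
-- ===== SOURCE A (Python) =====
-- def is_mathlib_reference(theorem, imports, opens):
--     """Check if a theorem reference belongs to mathlib"""
--
--     # Direct check for mathlib references
--     if theorem.startswith("mathlib.") or theorem.startswith("Mathlib."):
--         return True
--
--     # Check if the theorem has a namespace prefix that matches a mathlib import
--     for imp in imports:
--         if imp.startswith("mathlib") or imp.startswith("Mathlib"):
--             # If the theorem starts with any part of the import path
--             parts = imp.split('.')
--             for i in range(1, len(parts) + 1):
--                 prefix = '.'.join(parts[:i])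
--                 if theorem.startswith(prefix) or theorem.lower().startswith(prefix.lower()):
--                     return True
--
--     # Check if any opened namespaces are from mathlib
--     for open_ns in opens:
--         if open_ns.startswith("mathlib") or open_ns.startswith("Mathlib"):
--             # This is a bit more speculative - if mathlib namespace is opened,
--             # we consider identifiers that don't have a namespace prefix as potentially from mathlib
--             if '.' not in theorem:
--                 return True
--
--     # Check if the theorem uses common mathlib namespaces
--     common_mathlib_namespaces = [
--         "Nat.", "Int.", "Rat.", "Real.", "Complex.",
--         "Set.", "Finset.", "List.", "Vector.", "Option.", "Sum.",
--         "Matrix.", "Topology.", "Metric.", "Order.",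
--         "Algebra.", "Group.", "Ring.", "Field.", "Module.", "Linear.",
--         "Category.", "Logic.", "Tactic.", "Data.", "Lean.", "Array.",
--         "AddGroup.", "AddCommGroup.", "AddMonoid.", "Monoid.", "SemiGroup.",
--         "HasCoe.", "HasLift.", "Pi.", "Function.", "Cardinal.", "Ordinal.",
--         "Eq.", "Quot.", "Subgroup.", "Subring.", "PropSet."
--     ]
--
--     for namespace in common_mathlib_namespaces:
--         if theorem.startswith(namespace) or theorem.lower().startswith(namespace.lower()):
--             return True
--
--     return False
-- ===== SOURCE B (Python) =====
-- _COMMON_LOWER = (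
--     "nat.", "int.", "rat.", "real.", "complex.",
--     "set.", "finset.", "list.", "vector.", "option.", "sum.",
--     "matrix.", "topology.", "metric.", "order.",
--     "algebra.", "group.", "ring.", "field.", "module.", "linear.",
--     "category.", "logic.", "tactic.", "data.", "lean.", "array.",
--     "addgroup.", "addcommgroup.", "addmonoid.", "monoid.", "semigroup.",
--     "hascoe.", "haslift.", "pi.", "function.", "cardinal.", "ordinal.",
--     "eq.", "quot.", "subgroup.", "subring.", "propset.",
-- )
--
--
-- def is_mathlib_reference(theorem, imports, opens):
--     """Check if a theorem reference belongs to mathlib.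
--
--     Builds ONE table of lowercase candidate prefixes (the fixed common
--     namespaces plus the root segment of each mathlib import - the shortest
--     dotted prefix subsumes every longer one, case-insensitively) and makes a
--     single pass over it against the lowered theorem name.
--     """
--     if theorem.startswith(("mathlib.", "Mathlib.")):
--         return True
--     tl = theorem.lower()
--     candidates = list(_COMMON_LOWER)
--     for imp in imports:
--         if imp.startswith(("mathlib", "Mathlib")):
--             candidates.append(imp.partition('.')[0].lower())
--     if any(tl.startswith(p) for p in candidates):
--         return True
--     return '.' not in theorem and any(o.startswith(("mathlib", "Mathlib")) for o in opens)
-- ===== Notes on version B (the rewrite author's own statement) =====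
-- stated objective: alternative
-- what changed: A's staged nested scans (imports with an inner loop re-joining and testing every dotted prefix, then opens, then the two-sided common-namespace tests) are replaced by building one lowercase candidate-prefix table (pre-lowered common namespaces plus the root segment of each mathlib import, which subsumes all longer dotted prefixes case-insensitively) and making a single pass over it against the lowered theorem name.
import Mathlib
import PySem

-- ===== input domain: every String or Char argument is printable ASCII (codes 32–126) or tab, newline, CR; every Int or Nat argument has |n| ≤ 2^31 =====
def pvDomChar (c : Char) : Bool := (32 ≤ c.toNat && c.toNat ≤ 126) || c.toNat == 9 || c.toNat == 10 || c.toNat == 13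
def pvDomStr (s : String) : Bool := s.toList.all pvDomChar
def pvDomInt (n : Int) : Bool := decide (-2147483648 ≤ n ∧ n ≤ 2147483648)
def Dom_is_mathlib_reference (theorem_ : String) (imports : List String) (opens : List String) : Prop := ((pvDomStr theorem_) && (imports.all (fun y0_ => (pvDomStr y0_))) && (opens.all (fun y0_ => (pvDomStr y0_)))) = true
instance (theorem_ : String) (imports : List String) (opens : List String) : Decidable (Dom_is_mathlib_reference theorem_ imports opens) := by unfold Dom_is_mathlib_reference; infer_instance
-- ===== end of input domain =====

-- B replaces A's staged nested scans by one lowercase candidate-prefix table (common namespaces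
-- plus each mathlib import's root segment) scanned in a single pass against the lowered theorem.

-- ===== PORT A =====
-- common_mathlib_namespaces, verbatim
def mathlibCommonNamespaces : List String :=
  ["Nat.", "Int.", "Rat.", "Real.", "Complex.",
   "Set.", "Finset.", "List.", "Vector.", "Option.", "Sum.",
   "Matrix.", "Topology.", "Metric.", "Order.",
   "Algebra.", "Group.", "Ring.", "Field.", "Module.", "Linear.",
   "Category.", "Logic.", "Tactic.", "Data.", "Lean.", "Array.",
   "AddGroup.", "AddCommGroup.", "AddMonoid.", "Monoid.", "SemiGroup.",
   "HasCoe.", "HasLift.", "Pi.", "Function.", "Cardinal.", "Ordinal.",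
   "Eq.", "Quot.", "Subgroup.", "Subring.", "PropSet."]

-- body of A's `for imp in imports` loop (early `return True` ⇒ List.any)
def impHitA (theorem_ imp : String) : Bool :=
  (PySem.Str.startswith imp "mathlib" || PySem.Str.startswith imp "Mathlib") &&
    (let parts := (PySem.Str.split? imp ".").getD [];   -- '.' is non-empty: split never raises
     (PySem.List.pyRange 1 ((parts.length : Int) + 1)).any (fun i =>
       let pre := PySem.Str.join "." (PySem.List.slice parts none (some i));
       PySem.Str.startswith theorem_ pre ||
         PySem.Str.startswith (PySem.Str.lower theorem_) (PySem.Str.lower pre)))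

-- body of A's `for open_ns in opens` loop
def openHitA (theorem_ open_ns : String) : Bool :=
  (PySem.Str.startswith open_ns "mathlib" || PySem.Str.startswith open_ns "Mathlib") &&
    !(PySem.Str.isIn "." theorem_)

-- body of A's `for namespace in common_mathlib_namespaces` loop
def nsHitA (theorem_ ns : String) : Bool :=
  PySem.Str.startswith theorem_ ns ||
    PySem.Str.startswith (PySem.Str.lower theorem_) (PySem.Str.lower ns)

def is_mathlib_reference (theorem_ : String) (imports : List String) (opens : List String) : Bool :=
  if PySem.Str.startswith theorem_ "mathlib." || PySem.Str.startswith theorem_ "Mathlib." then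
    true
  else if imports.any (impHitA theorem_) then
    true
  else if opens.any (openHitA theorem_) then
    true
  else
    mathlibCommonNamespaces.any (nsHitA theorem_)

-- ===== PORT B =====
-- _COMMON_LOWER, verbatim
def mathlibCommonNamespacesLower : List String :=
  ["nat.", "int.", "rat.", "real.", "complex.",
   "set.", "finset.", "list.", "vector.", "option.", "sum.",
   "matrix.", "topology.", "metric.", "order.",
   "algebra.", "group.", "ring.", "field.", "module.", "linear.",
   "category.", "logic.", "tactic.", "data.", "lean.", "array.",
   "addgroup.", "addcommgroup.", "addmonoid.", "monoid.", "semigroup.",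
   "hascoe.", "haslift.", "pi.", "function.", "cardinal.", "ordinal.",
   "eq.", "quot.", "subgroup.", "subring.", "propset."]

-- `s.startswith(("mathlib", "Mathlib"))`
def isMathlibName (s : String) : Bool :=
  PySem.Str.startswith s "mathlib" || PySem.Str.startswith s "Mathlib"

-- `imp.partition('.')[0]`: the part before the first '.', ported by hand; exact for a
-- single-char separator (everything up to the first dot, the whole string if none).
def rootSegment (imp : String) : String :=
  String.ofList (imp.toList.takeWhile (fun c => c ≠ '.'))

-- Source B's candidate table: the loop appending roots of mathlib imports after _COMMON_LOWER
def candidatePrefixes (imports : List String) : List String :=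
  mathlibCommonNamespacesLower ++
    (imports.filter isMathlibName).map (fun imp => PySem.Str.lower (rootSegment imp))

def is_mathlib_reference_alt (theorem_ : String) (imports : List String) (opens : List String) : Bool :=
  if PySem.Str.startswith theorem_ "mathlib." || PySem.Str.startswith theorem_ "Mathlib." then
    true
  else
    let tl := PySem.Str.lower theorem_
    if (candidatePrefixes imports).any (fun p => PySem.Str.startswith tl p) then
      true
    else
      !(PySem.Str.isIn "." theorem_) && opens.any isMathlibName

-- ===== PRECONDITION & SPEC =====
def Spec_is_mathlib_reference (theorem_ : String) (imports : List String) (opens : List String) (out : Bool) : Prop := out = is_mathlib_reference_alt theorem_ imports opens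
instance (theorem_ : String) (imports : List String) (opens : List String) (out : Bool) : Decidable (Spec_is_mathlib_reference theorem_ imports opens out) := by unfold Spec_is_mathlib_reference; infer_instance

-- ===== CLAIM (what is proved, stated in full; the proofs are below) =====
def Claim_equal_is_mathlib_reference : Prop := ∀ (theorem_ : String) (imports : List String) (opens : List String), Dom_is_mathlib_reference theorem_ imports opens → Spec_is_mathlib_reference theorem_ imports opens (is_mathlib_reference theorem_ imports opens)

-- ===== LEMMAS AND PROOFS =====

-- the first piece of splitOn.go with a one-element accumulator is that element
theorem splitOn_go_headD_acc (sep : List Char) (fuel : Nat) (l cur : List Char)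
    (acc : List (List Char)) (x d : List Char) :
    (PySem.Chars.splitOn.go sep fuel l cur (acc ++ [x])).headD d = x := by
  induction fuel generalizing l cur acc with
  | zero => simp [PySem.Chars.splitOn.go]
  | succ n ih =>
    cases l with
    | nil => simp [PySem.Chars.splitOn.go]
    | cons c rest =>
      rw [PySem.Chars.splitOn.go]
      split_ifs with h
      · have := ih (List.drop sep.length (c :: rest)) [] (cur.reverse :: acc)
        simpa using this
      · exact ih rest (c :: cur) acc

-- with enough fuel, the first piece of splitOn.go on sep ['.'] is cur.reverse ++ takeWhile (≠ '.')
theorem splitOn_go_headD_dot (fuel : Nat) (l cur : List Char) (d : List Char)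
    (hf : l.length < fuel) :
    (PySem.Chars.splitOn.go ['.'] fuel l cur []).headD d =
      cur.reverse ++ l.takeWhile (fun c => c ≠ '.') := by
  induction fuel generalizing l cur with
  | zero => omega
  | succ n ih =>
    cases l with
    | nil => simp [PySem.Chars.splitOn.go]
    | cons c rest =>
      rw [PySem.Chars.splitOn.go]
      split_ifs with h
      · have hc : c = '.' := by
          simp [List.isPrefixOf] at h
          exact h.symm
        subst hc
        have hx := splitOn_go_headD_acc ['.'] n
          (List.drop (['.'] : List Char).length ('.' :: rest)) [] [] cur.reverse d
        simp only [List.nil_append] at hx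
        rw [hx]
        simp
      · have hc : ¬ c = '.' := by
          simp [List.isPrefixOf] at h
          exact fun hcc => h hcc.symm
        have hlen : rest.length < n := by simp at hf; omega
        rw [ih rest (c :: cur) hlen]
        simp [hc]

-- imp.split('.') (as a list of Strings) is never empty
theorem splitOn_go_ne_nil (sep : List Char) (fuel : Nat) (l cur : List Char)
    (acc : List (List Char)) : PySem.Chars.splitOn.go sep fuel l cur acc ≠ [] := by
  induction fuel generalizing l cur acc with
  | zero => simp [PySem.Chars.splitOn.go]
  | succ n ih =>
    cases l with
    | nil => simp [PySem.Chars.splitOn.go]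
    | cons c rest =>
      rw [PySem.Chars.splitOn.go]
      split_ifs with h
      · exact ih _ _ _
      · exact ih _ _ _

theorem split_dot_ne_nil (imp : String) : ((PySem.Str.split? imp ".").getD []) ≠ [] := by
  simp [PySem.Str.split?, PySem.Chars.split?]
  unfold PySem.Chars.splitOn
  exact splitOn_go_ne_nil _ _ _ _ _

-- imp.split('.')[0] (A's parts[0]) is Source B's root segment
theorem split_dot_head_eq_root (imp : String) :
    ((PySem.Str.split? imp ".").getD []).headD "" = rootSegment imp := by
  have h := splitOn_go_headD_dot (imp.toList.length + 1) imp.toList [] [] (by omega)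
  rcases hres : PySem.Chars.splitOn imp.toList ['.'] with _ | ⟨p, r⟩
  · exact absurd hres (by unfold PySem.Chars.splitOn; exact splitOn_go_ne_nil _ _ _ _ _)
  · have hp : p = imp.toList.takeWhile (fun c => c ≠ '.') := by
      unfold PySem.Chars.splitOn at hres
      rw [hres] at h
      simpa using h
    simp only [PySem.Str.split?, PySem.Chars.split?,
      show ("." : String).toList = ['.'] from rfl]
    simp [hres, hp, rootSegment]

-- lowering preserves startswith (both are char-wise maps)
theorem startswith_lower_mono (s p : String) (h : PySem.Str.startswith s p = true) :
    PySem.Str.startswith (PySem.Str.lower s) (PySem.Str.lower p) = true := by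
  rw [PySem.Str.startswith_eq, PySem.Chars.startswith_iff] at h ⊢
  rw [PySem.Str.toList_lower, PySem.Str.toList_lower]
  exact h.map _

-- a string starting with q also starts with any prefix of q
theorem startswith_of_prefix (s p q : String) (hpq : p.toList <+: q.toList)
    (h : PySem.Str.startswith s q = true) : PySem.Str.startswith s p = true := by
  rw [PySem.Str.startswith_eq, PySem.Chars.startswith_iff] at h ⊢
  exact hpq.trans h

-- the head of a '.'-joined non-empty list is a prefix of the join
theorem head_prefix_join (p0 : String) (t : List String) :
    p0.toList <+: (PySem.Str.join "." (p0 :: t)).toList := by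
  rw [PySem.Str.toList_join]
  cases t with
  | nil => simp [PySem.Chars.join_singleton]
  | cons q r =>
    simp only [List.map_cons, PySem.Chars.join_cons_cons]
    exact ((List.prefix_append _ _).trans (List.prefix_append _ _))

-- per-import equivalence: A's scan over all dotted prefixes hits iff the lowered theorem
-- starts with the import's lowered root segment
theorem impHit_eq (theorem_ imp : String) (hg : isMathlibName imp = true) :
    impHitA theorem_ imp =
      PySem.Str.startswith (PySem.Str.lower theorem_) (PySem.Str.lower (rootSegment imp)) := by
  unfold impHitA
  unfold isMathlibName at hg
  rw [hg, Bool.true_and]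
  rcases hp : (PySem.Str.split? imp ".").getD [] with _ | ⟨p0, rest⟩
  · exact absurd hp (split_dot_ne_nil imp)
  · have hroot : p0 = rootSegment imp := by
      have := split_dot_head_eq_root imp
      rw [hp] at this; simpa using this
    rw [Bool.eq_iff_iff, List.any_eq_true]
    constructor
    · rintro ⟨i, hmem, hpred⟩
      rw [PySem.List.mem_pyRange_one] at hmem
      have h0 : (0:Int) ≤ i := by omega
      rw [PySem.List.slice_to _ h0] at hpred
      have h1 : 1 ≤ i.toNat := by omega
      have htake : (p0 :: rest).take i.toNat = p0 :: rest.take (i.toNat - 1) := by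
        obtain ⟨k, hk⟩ : ∃ k, i.toNat = k + 1 := ⟨i.toNat - 1, by omega⟩
        simp [hk]
      rw [htake] at hpred
      have hpre : p0.toList <+: (PySem.Str.join "." (p0 :: rest.take (i.toNat - 1))).toList :=
        head_prefix_join _ _
      have hlow : (PySem.Str.lower p0).toList <+:
          (PySem.Str.lower (PySem.Str.join "." (p0 :: rest.take (i.toNat - 1)))).toList := by
        rw [PySem.Str.toList_lower, PySem.Str.toList_lower]
        exact hpre.map _
      rw [← hroot]
      rcases Bool.or_eq_true_iff.mp hpred with h | h
      · exact startswith_of_prefix _ _ _ hlow (startswith_lower_mono _ _ h)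
      · exact startswith_of_prefix _ _ _ hlow h
    · intro h
      refine ⟨1, ?_, ?_⟩
      · rw [PySem.List.mem_pyRange_one]
        constructor
        · omega
        · have : (0:Int) ≤ (rest.length : Int) := by positivity
          simp only [List.length_cons]
          push_cast
          omega
      · have hsl : PySem.List.slice (p0 :: rest) none (some 1) = [p0] := by
          rw [PySem.List.slice_to _ (by norm_num : (0:Int) ≤ 1)]
          simp
        simp only [hsl]
        have hj : (PySem.Str.lower (PySem.Str.join "." [p0])).toList = (PySem.Str.lower p0).toList := by
          rw [PySem.Str.toList_lower, PySem.Str.toList_lower, PySem.Str.toList_join]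
          simp [PySem.Chars.join_singleton]
        have hy : PySem.Str.startswith (PySem.Str.lower theorem_)
            (PySem.Str.lower (PySem.Str.join "." [p0])) = true := by
          rw [PySem.Str.startswith_eq, hj, ← PySem.Str.startswith_eq, hroot]
          exact h
        rw [hy, Bool.or_true]

-- A's imports loop hits iff some candidate root (B's filtered+mapped roots) matches
theorem impAny_eq (theorem_ : String) (imports : List String) :
    imports.any (impHitA theorem_) =
      ((imports.filter isMathlibName).map (fun imp => PySem.Str.lower (rootSegment imp))).any
        (fun p => PySem.Str.startswith (PySem.Str.lower theorem_) p) := by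
  rw [List.any_map, List.any_filter]
  refine List.any_congr rfl (fun imp => ?_)
  cases hg : isMathlibName imp with
  | false =>
    unfold impHitA
    unfold isMathlibName at hg
    rw [hg]
    simp
  | true => simp [impHit_eq theorem_ imp hg]

-- A's opens loop (guard && constant) = B's constant && any-guard form
theorem openAny_eq (theorem_ : String) (opens : List String) :
    opens.any (openHitA theorem_) =
      (!(PySem.Str.isIn "." theorem_) && opens.any isMathlibName) := by
  unfold openHitA isMathlibName
  cases PySem.Str.isIn "." theorem_ <;> simp

-- the lowered literal list is A's list mapped through lower
theorem commonLower_eq :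
    mathlibCommonNamespacesLower = mathlibCommonNamespaces.map PySem.Str.lower := by decide

-- A's two-sided namespace test collapses to the case-insensitive one
theorem nsHit_eq (theorem_ ns : String) :
    nsHitA theorem_ ns = PySem.Str.startswith (PySem.Str.lower theorem_) (PySem.Str.lower ns) := by
  unfold nsHitA
  cases h : PySem.Str.startswith theorem_ ns
  · simp
  · have h2 := startswith_lower_mono theorem_ ns h
    rw [h2]
    simp

theorem nsAny_eq (theorem_ : String) :
    mathlibCommonNamespaces.any (nsHitA theorem_) =
      mathlibCommonNamespacesLower.any
        (fun ns => PySem.Str.startswith (PySem.Str.lower theorem_) ns) := by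
  rw [commonLower_eq, List.any_map]
  exact List.any_congr rfl (fun ns => nsHit_eq theorem_ ns)

-- ===== VERDICT (by name: the statement is the Claim_ definition above) =====
theorem is_mathlib_reference_spec : Claim_equal_is_mathlib_reference := by
  intro theorem_ imports opens _
  unfold Spec_is_mathlib_reference is_mathlib_reference is_mathlib_reference_alt candidatePrefixes
  simp only [impAny_eq, openAny_eq, nsAny_eq, List.any_append]
  cases PySem.Str.startswith theorem_ "mathlib." || PySem.Str.startswith theorem_ "Mathlib."
  · cases hI : ((imports.filter isMathlibName).map
        (fun imp => PySem.Str.lower (rootSegment imp))).any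
        (fun p => PySem.Str.startswith (PySem.Str.lower theorem_) p) <;>
    cases hC : mathlibCommonNamespacesLower.any
        (fun ns => PySem.Str.startswith (PySem.Str.lower theorem_) ns) <;>
    cases hO : (!(PySem.Str.isIn "." theorem_) && opens.any isMathlibName) <;>
    simp
  · simp
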